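-- pv_equiv track=rewrite | github.com/jiananwu72/Laser | functions/lidar_function.py | split_gaps
-- ===== SOURCE A (Python) =====
-- def split_gaps(scan_data, threshold):
--     gaps = []
--     current = []
--     for angle, distance in scan_data:
--         if distance >= threshold:
--             current.append((angle, distance))
--         else:
--             if current:
--                 gaps.append(current)
--                 current = []
--     if current:
--         gaps.append(current)
--     return gaps
-- ===== SOURCE B (Python) =====
-- def split_gaps(scan_data, threshold):
--     # two-pointer run scan: find each maximal run of points at/above threshold
--     # and slice it out, instead of maintaining a growing 'current' accumulator
--     gaps = []
--     n = len(scan_data)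
--     i = 0
--     while i < n:
--         if scan_data[i][1] >= threshold:
--             j = i + 1
--             while j < n and scan_data[j][1] >= threshold:
--                 j += 1
--             gaps.append([(angle, distance) for angle, distance in scan_data[i:j]])
--             i = j
--         else:
--             i += 1
--     return gaps
-- ===== Notes on version B (the rewrite author's own statement) =====
-- stated objective: alternative
-- what changed: Replaces A's accumulator state machine (growing 'current' list flushed on below-threshold points) with a two-pointer scan that locates each maximal above-threshold run and slices it out directly.
import Mathlib
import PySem

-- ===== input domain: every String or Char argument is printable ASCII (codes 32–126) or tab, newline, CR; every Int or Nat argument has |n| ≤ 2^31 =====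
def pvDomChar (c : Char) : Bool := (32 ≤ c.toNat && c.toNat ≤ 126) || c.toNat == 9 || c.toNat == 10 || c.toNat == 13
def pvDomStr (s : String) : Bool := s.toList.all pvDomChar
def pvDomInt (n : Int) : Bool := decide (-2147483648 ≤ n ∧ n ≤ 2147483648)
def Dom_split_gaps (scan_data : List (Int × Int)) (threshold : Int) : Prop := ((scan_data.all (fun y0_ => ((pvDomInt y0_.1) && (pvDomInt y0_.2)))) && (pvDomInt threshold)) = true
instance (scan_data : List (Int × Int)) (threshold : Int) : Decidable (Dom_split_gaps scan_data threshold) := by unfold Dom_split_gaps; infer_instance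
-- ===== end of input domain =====

-- B replaces A's current-accumulator state machine with a two-pointer maximal-run scan (alternative decomposition, same cost).


-- ===== PORT A =====
-- literal port of A: fold over the points carrying (gaps, current); a final flush of current
def split_gaps (scan_data : List (Int × Int)) (threshold : Int) : List (List (Int × Int)) :=
  let r := scan_data.foldl
    (fun (st : List (List (Int × Int)) × List (Int × Int)) x =>
      if x.2 ≥ threshold then (st.1, st.2 ++ [x])
      else if st.2 ≠ [] then (st.1 ++ [st.2], ([] : List (Int × Int))) else st)
    ([], [])
  if r.2 ≠ [] then r.1 ++ [r.2] else r.1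

-- ===== PORT B =====
-- port of Source B's two-pointer scan: skip below-threshold points; at an above-threshold
-- point, the inner `while j` loop is `takeWhile` (the sliced-out run) / `dropWhile`
-- (resuming at index j)
def splitGapsRuns (threshold : Int) : List (Int × Int) → List (List (Int × Int))
  | [] => []
  | x :: xs =>
    if x.2 ≥ threshold then
      (x :: xs.takeWhile (fun y => y.2 ≥ threshold)) ::
        splitGapsRuns threshold (xs.dropWhile (fun y => y.2 ≥ threshold))
    else splitGapsRuns threshold xs
termination_by l => l.length
decreasing_by
  · exact Nat.lt_succ_of_le (xs.length_dropWhile_le _)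
  · simp

def split_gaps_alt (scan_data : List (Int × Int)) (threshold : Int) : List (List (Int × Int)) :=
  splitGapsRuns threshold scan_data

-- ===== PRECONDITION & SPEC =====
def Spec_split_gaps (scan_data : List (Int × Int)) (threshold : Int) (out : List (List (Int × Int))) : Prop := out = split_gaps_alt scan_data threshold
instance (scan_data : List (Int × Int)) (threshold : Int) (out : List (List (Int × Int))) : Decidable (Spec_split_gaps scan_data threshold out) := by unfold Spec_split_gaps; infer_instance

-- ===== CLAIM (what is proved, stated in full; the proofs are below) =====
def Claim_equal_split_gaps : Prop := ∀ (scan_data : List (Int × Int)) (threshold : Int), Dom_split_gaps scan_data threshold → Spec_split_gaps scan_data threshold (split_gaps scan_data threshold)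

-- ===== LEMMAS AND PROOFS =====

-- proof-only names for A's loop body and final flush
def stepA (threshold : Int) (st : List (List (Int × Int)) × List (Int × Int)) (x : Int × Int) :
    List (List (Int × Int)) × List (Int × Int) :=
  if x.2 ≥ threshold then (st.1, st.2 ++ [x])
  else if st.2 ≠ [] then (st.1 ++ [st.2], ([] : List (Int × Int))) else st

def finishA (st : List (List (Int × Int)) × List (Int × Int)) : List (List (Int × Int)) :=
  if st.2 ≠ [] then st.1 ++ [st.2] else st.1

-- proof-only: A's loop written as structural recursion with the 'current' accumulator
def fAux (threshold : Int) (current : List (Int × Int)) : List (Int × Int) → List (List (Int × Int))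
  | [] => if current ≠ [] then [current] else []
  | x :: xs =>
    if x.2 ≥ threshold then fAux threshold (current ++ [x]) xs
    else if current ≠ [] then current :: fAux threshold [] xs else fAux threshold [] xs

-- A's fold + final flush equals fAux, for any accumulated state
theorem split_gaps_fold_eq (threshold : Int) :
    ∀ (l : List (Int × Int)) (gaps : List (List (Int × Int))) (current : List (Int × Int)),
      finishA (l.foldl (stepA threshold) (gaps, current)) = gaps ++ fAux threshold current l := by
  intro l
  induction l with
  | nil =>
    intro gaps current
    simp only [List.foldl_nil, finishA, fAux]
    split_ifs <;> simp
  | cons x xs ih =>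
    intro gaps current
    rw [List.foldl_cons]
    by_cases h1 : x.2 ≥ threshold
    · rw [show stepA threshold (gaps, current) x = (gaps, current ++ [x]) from by
        simp [stepA, h1]]
      rw [ih gaps (current ++ [x]), fAux, if_pos h1]
    · by_cases h2 : current = []
      · rw [show stepA threshold (gaps, current) x = (gaps, current) from by
          simp [stepA, h1, h2]]
        rw [ih gaps current, fAux, if_neg h1, h2, if_neg (by simp)]
      · rw [show stepA threshold (gaps, current) x = (gaps ++ [current], []) from by
          simp [stepA, h1, h2]]
        rw [ih (gaps ++ [current]) [], fAux, if_neg h1, if_pos h2]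
        simp

-- fAux with empty accumulator is B's run scan; with a nonempty accumulator it
-- completes the pending run with the leading takeWhile segment
theorem fAux_runs (threshold : Int) :
    ∀ (l : List (Int × Int)),
      fAux threshold [] l = splitGapsRuns threshold l ∧
      ∀ c : List (Int × Int), c ≠ [] →
        fAux threshold c l =
          (c ++ l.takeWhile (fun y => y.2 ≥ threshold)) ::
            splitGapsRuns threshold (l.dropWhile (fun y => y.2 ≥ threshold)) := by
  intro l
  induction l with
  | nil =>
    refine ⟨by simp [fAux, splitGapsRuns], ?_⟩
    intro c hc
    simp [fAux, splitGapsRuns, hc]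
  | cons x xs ih =>
    obtain ⟨ih1, ih2⟩ := ih
    by_cases hx : x.2 ≥ threshold
    · constructor
      · rw [fAux, if_pos hx]
        simp only [List.nil_append]
        rw [ih2 [x] (by simp), splitGapsRuns, if_pos hx]
        simp
      · intro c hc
        rw [fAux, if_pos hx, ih2 (c ++ [x]) (by simp),
          List.takeWhile_cons_of_pos (by simpa using hx),
          List.dropWhile_cons_of_pos (by simpa using hx)]
        simp
    · constructor
      · rw [fAux, if_neg hx, if_neg (by simp : ¬(([] : List (Int × Int)) ≠ [])), ih1,
          splitGapsRuns, if_neg hx]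
      · intro c hc
        rw [fAux, if_neg hx, if_pos hc, ih1,
          List.takeWhile_cons_of_neg (by simpa using hx),
          List.dropWhile_cons_of_neg (by simpa using hx),
          splitGapsRuns, if_neg hx]
        simp

-- ===== VERDICT (by name: the statement is the Claim_ definition above) =====
theorem split_gaps_spec : Claim_equal_split_gaps := by
  intro scan_data threshold _
  unfold Spec_split_gaps split_gaps_alt
  have h : split_gaps scan_data threshold
      = finishA (scan_data.foldl (stepA threshold) ([], [])) := rfl
  rw [h, split_gaps_fold_eq threshold scan_data [] []]
  simpa using (fAux_runs threshold scan_data).1
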